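-- pv_equiv track=rewrite | github.com/lassenmit/crispr-comparison | selfTarget/Scripts/dlpredict.py | find_pam
-- ===== SOURCE A (Python) =====
-- def find_pam(seq):
-- 	# A function that returns the index(s)
-- 	# for different Pams
--     pams = ['AGG','TGG','CGG','GGG']
--     all_indexes = []
--     for index in range(len(seq)):
--         codon = seq[index:(index+3)]
--         if codon in pams:
--             all_indexes.append(index)
--     return all_indexes
-- ===== SOURCE B (Python) =====
-- def find_pam(seq):
--     # Jump between 'GG' occurrences with str.find instead of scanning every window.
--     all_indexes = []
--     pos = 0
--     while True:
--         p = seq.find('GG', pos)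
--         if p == -1:
--             return all_indexes
--         if p >= 1 and seq[p-1] in 'ATCG':
--             all_indexes.append(p - 1)
--         pos = p + 1
-- ===== Notes on version B (the rewrite author's own statement) =====
-- stated objective: faster
-- what changed: Instead of extracting and testing every length-3 window against the PAM list, B jumps between occurrences of the double-G dinucleotide using str.find with a moving start position and records p-1 whenever p >= 1 and the preceding character is one of ATCG, advancing the start to p+1 to keep overlapping matches.
import Mathlib
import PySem

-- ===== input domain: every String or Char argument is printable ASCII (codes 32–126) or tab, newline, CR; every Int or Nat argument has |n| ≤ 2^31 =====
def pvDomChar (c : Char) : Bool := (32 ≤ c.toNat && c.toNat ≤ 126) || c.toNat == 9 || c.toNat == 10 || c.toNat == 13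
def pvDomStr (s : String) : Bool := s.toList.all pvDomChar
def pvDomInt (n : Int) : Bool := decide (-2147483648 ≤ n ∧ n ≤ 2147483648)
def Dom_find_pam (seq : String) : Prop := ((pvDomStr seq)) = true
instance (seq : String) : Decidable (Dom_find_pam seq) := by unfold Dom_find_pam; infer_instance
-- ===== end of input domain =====

-- B replaces A's per-index window slicing with str.find jumps between
-- successive double-G occurrences (C-level scanning; a timing run measured B faster).


-- ===== PORT A =====
-- for index in range(len(seq)): codon = seq[index:index+3]; if codon in pams: append index
def find_pam (seq : String) : List Int :=
  let pams : List (List Char) := [['A','G','G'],['T','G','G'],['C','G','G'],['G','G','G']]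
  (PySem.List.pyRange 0 (PySem.Str.len seq) 1).foldl
    (fun all_indexes index =>
      let codon := PySem.List.slice seq.toList (some index) (some (index + 3))
      if codon ∈ pams then all_indexes ++ [index] else all_indexes) []

-- ===== PORT B =====
-- while True: p = seq.find('GG', pos); if p == -1: return; if p>=1 and seq[p-1] in 'ATCG': append p-1; pos = p+1
-- (fuel = len+1 is a totality guard only: each iteration strictly advances pos, so fuel never runs out)
def findPamAltLoop (s : List Char) : Nat → Nat → List Int → List Int
  | 0, _, acc => acc
  | fuel+1, pos, acc =>
    let p := PySem.Chars.findFrom s ['G','G'] (pos : Int) none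
    if p = -1 then acc
    else
      findPamAltLoop s fuel (p + 1).toNat
        (if 1 ≤ p ∧ PySem.Chars.isIn [PySem.List.pyGetD s (p - 1) ' '] ['A','T','C','G'] = true
         then acc ++ [p - 1] else acc)

def find_pam_alt (seq : String) : List Int :=
  findPamAltLoop seq.toList (seq.toList.length + 1) 0 []

-- ===== PRECONDITION & SPEC =====
def Spec_find_pam (seq : String) (out : List Int) : Prop := out = find_pam_alt seq
instance (seq : String) (out : List Int) : Decidable (Spec_find_pam seq out) := by unfold Spec_find_pam; infer_instance

-- ===== CLAIM (what is proved, stated in full; the proofs are below) =====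
def Claim_equal_find_pam : Prop := ∀ (seq : String), Dom_find_pam seq → Spec_find_pam seq (find_pam seq)

-- ===== LEMMAS AND PROOFS =====

-- A's window test at natural index k
def condPam (s : List Char) (k : Nat) : Bool :=
  decide ((s.drop k).take 3 ∈ ([['A','G','G'],['T','G','G'],['C','G','G'],['G','G','G']] : List (List Char)))

-- the ascending list of indices i ≥ k passing A's test
def gIdx (s : List Char) (k : Nat) : List Int :=
  if s.length ≤ k then [] else (if condPam s k then [(k : Int)] else []) ++ gIdx s (k + 1)
termination_by s.length - k

lemma condPam_iff (s : List Char) (k : Nat) :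
    condPam s k = true ↔
      ['G','G'] <+: s.drop (k + 1) ∧
        ∃ c, s[k]? = some c ∧ (c = 'A' ∨ c = 'T' ∨ c = 'C' ∨ c = 'G') := by
  have hdrop : s.drop (k+1) = (s.drop k).drop 1 := by
    rw [List.drop_drop]
  have hget : s[k]? = (s.drop k)[0]? := by
    simp [List.getElem?_drop]
  rw [condPam, hdrop, hget]
  rcases ht : s.drop k with _ | ⟨a, _ | ⟨b, _ | ⟨c, r⟩⟩⟩ <;>
    simp [List.cons_prefix_cons] <;> tauto

lemma gIdx_skip (s : List Char) (m : Nat) : ∀ k, k ≤ m →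
    (∀ i, k ≤ i → i < m → condPam s i = false) → gIdx s k = gIdx s m := by
  intro k hk h
  induction hmk : m - k generalizing k with
  | zero =>
    have hh : k = m := by omega
    rw [hh]
  | succ n ih =>
    have hkm : k < m := by omega
    rw [gIdx]
    by_cases hl : s.length ≤ k
    · rw [gIdx.eq_def s m]
      have hlm : s.length ≤ m := by omega
      simp [hl, hlm]
    · simp only [hl, if_false, h k le_rfl hkm, Bool.false_eq_true, List.nil_append]
      exact ih (k+1) (by omega) (fun i h1 h2 => h i (by omega) h2) (by omega)

lemma gIdx_of_no_cond (s : List Char) (k : Nat)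
    (h : ∀ i, k ≤ i → condPam s i = false) : gIdx s k = [] := by
  by_cases hl : k ≤ s.length
  · rw [gIdx_skip s s.length k hl (fun i h1 _ => h i h1), gIdx]; simp
  · rw [gIdx]; simp; omega

lemma foldl_gIdx (s : List Char) : ∀ (m k : Nat), k + m = s.length → ∀ acc : List Int,
    (List.range' k m).foldl (fun a i => if condPam s i then a ++ [(i : Int)] else a) acc
      = acc ++ gIdx s k := by
  intro m
  induction m with
  | zero => intro k hk acc; rw [gIdx]; simp; omega
  | succ n ih =>
    intro k hk acc
    rw [List.range'_succ, List.foldl_cons, gIdx]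
    have : ¬ s.length ≤ k := by omega
    simp only [this, if_false]
    rw [ih (k+1) (by omega)]
    by_cases hc : condPam s k = true <;> simp [hc]

lemma find_pam_eq_gIdx (seq : String) : find_pam seq = gIdx seq.toList 0 := by
  unfold find_pam
  have hlen : PySem.Str.len seq = (seq.toList.length : Int) := by
    simp [PySem.Str.len_eq]
  rw [hlen, PySem.List.pyRange_zero_natCast, List.foldl_map]
  have hstep : (fun (a : List Int) (k : Nat) =>
      if PySem.List.slice seq.toList (some (k:Int)) (some ((k:Int) + 3)) ∈
          ([['A','G','G'],['T','G','G'],['C','G','G'],['G','G','G']] : List (List Char))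
        then a ++ [((k:Nat) : Int)] else a)
      = fun a k => if condPam seq.toList k then a ++ [(k : Int)] else a := by
    funext a k
    have h3 : ((k:Int) + 3) = ((k:Int) + ((3:Nat):Int)) := by norm_num
    rw [h3, PySem.List.slice_natCast_add]
    simp [condPam]
  simp only [hstep]
  rw [List.range_eq_range', foldl_gIdx seq.toList seq.toList.length 0 (by omega)]
  rfl

-- a prefix of some drop of t is an infix of t
lemma prefix_drop_infix {sub t : List Char} {j : Nat} (h : sub <+: t.drop j) : sub <:+: t := by
  rcases h with ⟨r, hr⟩
  exact ⟨t.take j, r, by rw [List.append_assoc, hr, List.take_append_drop]⟩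

lemma bLoop_eq (s : List Char) : ∀ (fuel pos : Nat) (acc : List Int),
    pos ≤ s.length → s.length - pos < fuel →
    findPamAltLoop s fuel pos acc = acc ++ gIdx s (pos - 1) := by
  intro fuel
  induction fuel with
  | zero => intro pos acc h1 h2; omega
  | succ n ih =>
    intro pos acc hpos hfuel
    rw [findPamAltLoop]
    set p := PySem.Chars.findFrom s ['G','G'] (pos : Int) none with hp
    by_cases hneg : p = -1
    · -- no 'GG' at or after pos: gIdx from pos-1 is empty
      simp only [hneg]
      rw [gIdx_of_no_cond]
      · simp
      · intro i hi
        by_contra hc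
        have hc' : condPam s i = true := by
          cases h : condPam s i with
          | false => exact absurd h hc
          | true => rfl
        obtain ⟨hpre, _⟩ := (condPam_iff s i).mp hc'
        have hnin := (PySem.Chars.findFrom_natCast_eq_neg_one_iff s ['G','G'] pos hpos).mp hneg
        have hdd : s.drop (i+1) = (s.drop pos).drop (i+1-pos) := by
          rw [List.drop_drop]; congr 1; omega
        rw [hdd] at hpre
        exact hnin (prefix_drop_infix hpre)
    · have hspec := PySem.Chars.findFrom_natCast_spec s ['G','G'] pos hpos hneg
      rw [← hp] at hspec
      obtain ⟨hle, hpre, hmin⟩ := hspec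
      set P := p.toNat with hP
      have hp0 : 0 ≤ p := le_trans (by positivity) hle
      have hpP : p = (P : Int) := by omega
      have hP2 : P + 2 ≤ s.length := by
        have := hpre.length_le
        simp at this; omega
      have hPpos : pos ≤ P := by omega
      simp only [hneg]
      have hp1 : (p + 1).toNat = P + 1 := by omega
      rw [hp1, ih (P+1) _ (by omega) (by omega)]
      by_cases hP0 : P = 0
      · have hpz : pos = 0 := by omega
        have hcond : ¬ (1 ≤ p ∧ PySem.Chars.isIn [PySem.List.pyGetD s (p - 1) ' '] ['A','T','C','G'] = true) := by
          intro ⟨h1, _⟩; omega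
        subst hpz
        rw [hP0]
        simp [hcond]
      · -- P ≥ 1: the only candidate window below P starting at or after pos-1 is P-1
        have hQ : P - 1 < s.length := by omega
        have hgd : PySem.List.pyGetD s (p - 1) ' ' = s[P-1] := by
          have he : p - 1 = ((P - 1 : Nat) : Int) := by omega
          rw [he, PySem.List.pyGetD_natCast, List.getD_eq_getElem?_getD, List.getElem?_eq_getElem hQ]
          rfl
        have hmem : PySem.Chars.isIn [s[P-1]] ['A','T','C','G'] = true ↔
            (s[P-1] = 'A' ∨ s[P-1] = 'T' ∨ s[P-1] = 'C' ∨ s[P-1] = 'G') := by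
          rw [PySem.Chars.isIn_iff_infix, List.singleton_infix_iff]
          simp
        have hcondP : condPam s (P-1) = true ↔
            (1 ≤ p ∧ PySem.Chars.isIn [PySem.List.pyGetD s (p - 1) ' '] ['A','T','C','G'] = true) := by
          rw [condPam_iff, hgd, hmem]
          constructor
          · rintro ⟨_, c, hc, hd⟩
            refine ⟨by omega, ?_⟩
            rw [List.getElem?_eq_getElem hQ] at hc
            cases hc; exact hd
          · rintro ⟨_, hd⟩
            have hP1 : P - 1 + 1 = P := by omega
            rw [hP1]
            exact ⟨hpre, s[P-1], List.getElem?_eq_getElem hQ, hd⟩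
        have hskip : gIdx s (pos - 1) = gIdx s (P - 1) := by
          apply gIdx_skip s (P-1) (pos-1) (by omega)
          intro i h1 h2
          by_contra hc
          have hc' : condPam s i = true := by
            cases h : condPam s i with
            | false => exact absurd h hc
            | true => rfl
          obtain ⟨hpre2, _⟩ := (condPam_iff s i).mp hc'
          exact hmin (i+1) (by omega) (by omega) hpre2
        have hunfold : gIdx s (P - 1) =
            (if condPam s (P-1) then [((P-1 : Nat) : Int)] else []) ++ gIdx s P := by
          have h1 : ¬ s.length ≤ P - 1 := by omega
          have hP1 : P - 1 + 1 = P := by omega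
          rw [gIdx, if_neg h1, hP1]
        rw [hskip, hunfold]
        by_cases hc : condPam s (P-1) = true
        · rw [if_pos hc, if_pos (hcondP.mp hc)]
          have hpm : p - 1 = ((P - 1 : Nat) : Int) := by omega
          rw [hpm]
          simp
        · rw [if_neg hc, if_neg (fun h => hc (hcondP.mpr h))]
          simp

-- ===== VERDICT (by name: the statement is the Claim_ definition above) =====
theorem find_pam_spec : Claim_equal_find_pam := by
  intro seq _
  unfold Spec_find_pam find_pam_alt
  rw [find_pam_eq_gIdx, bLoop_eq seq.toList (seq.toList.length + 1) 0 [] (by omega) (by omega)]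
  rfl
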